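-- pv_equiv track=rewrite | github.com/MrBrantCode/unitest_baseline | mut_generate/mist_train_taco/taco_16947/solution.py | calculate_shortest_steps
-- ===== SOURCE A (Python) =====
-- from collections import deque
--
-- def calculate_shortest_steps(N, edges):
--     # Create the graph as an adjacency list
--     G = [[] for _ in range(N)]
--     for u, v in edges:
--         G[u - 1].append(v - 1)
--         G[v - 1].append(u - 1)
--
--     # Function to perform BFS and calculate distances from a given start node
--     def bfs(start):
--         dist = [-1] * N
--         dist[start] = 0
--         que = deque([start])
--         while que:
--             tmp = que.popleft()
--             for i in G[tmp]:
--                 if dist[i] == -1: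
--                     dist[i] = dist[tmp] + 1
--                     que.append(i)
--         return dist
--
--     # Find the farthest node from node 0
--     dist_from_0 = bfs(0)
--     start = max(range(N), key=lambda x: dist_from_0[x])
--
--     # Find the farthest node from the previously found farthest node
--     dist_from_start = bfs(start)
--     goal = max(range(N), key=lambda x: dist_from_start[x])
--
--     # Find the farthest node from the goal node
--     dist_from_goal = bfs(goal)
--
--     # Calculate the shortest steps to visit all vertices starting from each vertex
--     result = []
--     for i in range(N):
--         result.append(2 * (N - 1) - max(dist_from_start[i], dist_from_goal[i]))
--
--     return result
-- ===== SOURCE B (Python) =====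
-- def calculate_shortest_steps(N, edges):
--     # Queue-free alternative: distances by Bellman-Ford-style synchronous level
--     # relaxation (round k relabels every unvisited vertex adjacent to level k),
--     # stopping at the first round that changes nothing; no BFS queue/frontier.
--     G = [[] for _ in range(N)]
--     for u, v in edges:
--         G[u - 1].append(v - 1)
--         G[v - 1].append(u - 1)
--
--     def distances(start):
--         dist = [-1] * N
--         dist[start] = 0
--         for k in range(N):
--             new = [k + 1 if dist[i] == -1 and any(dist[j] == k for j in G[i]) else dist[i]
--                    for i in range(N)]
--             if new == dist:
--                 break
--             dist = new
--         return dist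
--
--     d0 = distances(0)
--     start = d0.index(max(d0))
--     ds = distances(start)
--     goal = ds.index(max(ds))
--     dg = distances(goal)
--     return [2 * (N - 1) - (a if a > b else b) for a, b in zip(ds, dg)]
-- ===== Notes on version B (the rewrite author's own statement) =====
-- stated objective: alternative
-- what changed: B drops A's BFS entirely: no queue and no frontier — each distance array is computed by a Bellman-Ford-style synchronous fixpoint iteration (round k rebuilds the whole array, relabelling every still-unvisited vertex adjacent to a level-k vertex, and stops at the first round that changes nothing), endpoints are picked with dist.index(max(dist)) and the result built by zipping the two distance arrays.
import Mathlib
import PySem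

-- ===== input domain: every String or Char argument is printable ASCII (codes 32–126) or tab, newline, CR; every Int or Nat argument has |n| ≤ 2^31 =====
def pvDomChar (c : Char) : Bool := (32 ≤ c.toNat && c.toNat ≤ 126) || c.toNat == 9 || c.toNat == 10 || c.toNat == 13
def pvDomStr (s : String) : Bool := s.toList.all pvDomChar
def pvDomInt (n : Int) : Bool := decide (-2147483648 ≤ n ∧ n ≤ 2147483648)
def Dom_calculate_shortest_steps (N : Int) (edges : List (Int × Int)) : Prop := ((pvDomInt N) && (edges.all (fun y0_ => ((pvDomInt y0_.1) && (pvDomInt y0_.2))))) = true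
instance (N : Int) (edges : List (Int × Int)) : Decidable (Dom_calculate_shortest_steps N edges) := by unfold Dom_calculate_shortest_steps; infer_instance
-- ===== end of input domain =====

set_option maxHeartbeats 1600000

-- B replaces A's deque-based BFS entirely: distances are computed by a queue-free
-- Bellman-Ford-style synchronous relaxation (round k relabels every unvisited vertex
-- adjacent to a level-k vertex, stopping at the first unchanged round), endpoints via
-- dist.index(max(dist)), result via zip; same values everywhere A returns.

-- ===== PORT A =====

-- G[u-1].append(v-1); G[v-1].append(u-1)
def pvAppendAt (G : List (List Int)) (i x : Int) : List (List Int) :=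
  PySem.List.pySetD G i (PySem.List.pyGetD G i [] ++ [x])

def pvBuildG (N : Int) (edges : List (Int × Int)) : List (List Int) :=
  edges.foldl (fun G e => pvAppendAt (pvAppendAt G (e.1 - 1) (e.2 - 1)) (e.2 - 1) (e.1 - 1))
    (List.replicate N.toNat [])

-- inner loop of A's BFS: for i in G[tmp]: if dist[i]==-1: dist[i]=dist[tmp]+1; que.append(i)
def pvVisit (dist : List Int) (nw : List Int) (t : Int) : List Int → List Int × List Int
  | [] => (dist, nw)
  | j :: js =>
    if PySem.List.pyGetD dist j (-2) = -1 then
      pvVisit (PySem.List.pySetD dist j (PySem.List.pyGetD dist t (-2) + 1)) (nw ++ [j]) t js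
    else pvVisit dist nw t js

-- A's BFS: FIFO queue, pop from the front, push discoveries at the back (fuel = N+1 ≥ #dequeues)
def pvBfsLoop (G : List (List Int)) : Nat → List Int → List Int → List Int
  | _, [], dist => dist
  | 0, _ :: _, dist => dist
  | fuel + 1, t :: q, dist =>
    let p := pvVisit dist [] t (PySem.List.pyGetD G t [])
    pvBfsLoop G fuel (q ++ p.2) p.1

def pvBfs (G : List (List Int)) (N start : Int) : List Int :=
  pvBfsLoop G (N.toNat + 1) [start] (PySem.List.pySetD (List.replicate N.toNat (-1)) start 0)

def calculate_shortest_steps (N : Int) (edges : List (Int × Int)) : List Int :=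
  let G := pvBuildG N edges
  let d0 := pvBfs G N 0
  let start := (PySem.List.max? (PySem.List.pyRange 0 N 1) (fun x => PySem.List.pyGetD d0 x (-2))).getD 0
  let ds := pvBfs G N start
  let goal := (PySem.List.max? (PySem.List.pyRange 0 N 1) (fun x => PySem.List.pyGetD ds x (-2))).getD 0
  let dg := pvBfs G N goal
  (PySem.List.pyRange 0 N 1).map
    (fun i => 2 * (N - 1) - max (PySem.List.pyGetD ds i (-2)) (PySem.List.pyGetD dg i (-2)))

-- ===== PORT B =====

-- one relaxation round: [k+1 if dist[i]==-1 and any(dist[j]==k for j in G[i]) else dist[i] for i in range(N)]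
def pvRound (G : List (List Int)) (N : Int) (dist : List Int) (k : Int) : List Int :=
  (PySem.List.pyRange 0 N 1).map (fun i =>
    if PySem.List.pyGetD dist i (-2) = -1 ∧
       (PySem.List.pyGetD G i []).any (fun j => PySem.List.pyGetD dist j (-2) == k) = true
    then k + 1 else PySem.List.pyGetD dist i (-2))

-- for k in range(N): new = round(...); if new == dist: break; dist = new
def pvDistLoop (G : List (List Int)) (N : Int) : List Int → List Int → List Int
  | [], dist => dist
  | k :: ks, dist =>
    let nw := pvRound G N dist k
    if nw = dist then dist else pvDistLoop G N ks nw

def pvDistances (G : List (List Int)) (N start : Int) : List Int :=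
  pvDistLoop G N (PySem.List.pyRange 0 N 1)
    (PySem.List.pySetD (List.replicate N.toNat (-1)) start 0)

-- dist.index(max(dist))
def pvArgmaxFirst (d : List Int) : Int :=
  (((PySem.List.index? d ((PySem.List.max? d (fun y => y)).getD (-2))).getD 0 : Nat) : Int)

def calculate_shortest_steps_alt (N : Int) (edges : List (Int × Int)) : List Int :=
  let G := pvBuildG N edges
  let d0 := pvDistances G N 0
  let start := pvArgmaxFirst d0
  let ds := pvDistances G N start
  let goal := pvArgmaxFirst ds
  let dg := pvDistances G N goal
  (ds.zip dg).map (fun p => 2 * (N - 1) - (if p.2 < p.1 then p.1 else p.2))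

-- ===== PRECONDITION & SPEC =====
-- Pre_ excludes exactly the inputs where A raises: N < 1 (IndexError on dist[0]) and
-- edge labels outside [1-N, N] (IndexError building the adjacency list).
def Pre_calculate_shortest_steps (N : Int) (edges : List (Int × Int)) : Prop :=
  1 ≤ N ∧ ∀ e ∈ edges, (1 - N ≤ e.1 ∧ e.1 ≤ N) ∧ (1 - N ≤ e.2 ∧ e.2 ≤ N)
instance (N : Int) (edges : List (Int × Int)) : Decidable (Pre_calculate_shortest_steps N edges) := by
  unfold Pre_calculate_shortest_steps; infer_instance

def pvWitness_calculate_shortest_steps : Int × (List (Int × Int)) := (3, [(1, 2), (2, 3)])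

def Spec_calculate_shortest_steps (N : Int) (edges : List (Int × Int)) (out : List Int) : Prop := out = calculate_shortest_steps_alt N edges
instance (N : Int) (edges : List (Int × Int)) (out : List Int) : Decidable (Spec_calculate_shortest_steps N edges out) := by unfold Spec_calculate_shortest_steps; infer_instance

-- ===== CLAIM (what is proved, stated in full; the proofs are below) =====
def Claim_equal_calculate_shortest_steps : Prop := ∀ (N : Int) (edges : List (Int × Int)), Dom_calculate_shortest_steps N edges → Pre_calculate_shortest_steps N edges → Spec_calculate_shortest_steps N edges (calculate_shortest_steps N edges)

-- ===== LEMMAS AND PROOFS =====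

-- a Python index t is valid for a list of length n, and its canonical (wrapped) position
def pvValid (n : Nat) (t : Int) : Prop := -(n : Int) ≤ t ∧ t < n

def pvNorm (n : Nat) (t : Int) : Nat := if 0 ≤ t then t.toNat else n - (-t).toNat

lemma pvValid_norm {α : Type} {n : Nat} {t : Int} (h : pvValid n t) (d : List α) (hd : d.length = n) (v x : α) :
    pvNorm n t < n ∧ PySem.List.pyGetD d t x = d.getD (pvNorm n t) x ∧ PySem.List.pySetD d t v = d.set (pvNorm n t) v := by
  subst hd
  unfold pvNorm
  refine ⟨?_, ?_, ?_⟩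
  · rcases h with ⟨h1, h2⟩
    split_ifs with h0 <;> omega
  · simp only [PySem.List.pyGetD, PySem.List.pyGet?, PySem.List.pyIdx?]
    rcases h with ⟨h1, h2⟩
    split_ifs with h0
    · simp [List.getD_eq_getElem?_getD]
    · simp [List.getD_eq_getElem?_getD]
  · simp only [PySem.List.pySetD, PySem.List.pySet?, PySem.List.pyIdx?]
    rcases h with ⟨h1, h2⟩
    split_ifs with h0
    · simp
    · simp

lemma pvVisit_fst_length (dist nw : List Int) (t : Int) (js : List Int) :
    (pvVisit dist nw t js).1.length = dist.length := by
  induction js generalizing dist nw with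
  | nil => simp [pvVisit]
  | cons j js ih =>
    by_cases hc : PySem.List.pyGetD dist j (-2) = -1 <;>
      simp [pvVisit, hc, ih, PySem.List.length_pySetD]

lemma pvVisit_acc (dist nw : List Int) (t : Int) (js : List Int) :
    (pvVisit dist nw t js).1 = (pvVisit dist [] t js).1 ∧
    (pvVisit dist nw t js).2 = nw ++ (pvVisit dist [] t js).2 := by
  induction js generalizing dist nw with
  | nil => simp [pvVisit]
  | cons j js ih =>
    by_cases hc : PySem.List.pyGetD dist j (-2) = -1 <;>
      simp only [pvVisit, hc, if_true, if_false]
    · constructor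
      · rw [(ih _ _).1, (ih _ ([] ++ [j])).1]
      · rw [(ih _ (nw ++ [j])).2, (ih _ ([] ++ [j])).2, List.nil_append, List.append_assoc]
    · exact ih dist nw

lemma pvValid_of_hit (dist : List Int) (j : Int) (hc : PySem.List.pyGetD dist j (-2) = -1) :
    pvValid dist.length j := by
  by_contra hn
  rw [PySem.List.pyGetD, PySem.List.pyGet?_eq_none_iff dist j |>.2 hn] at hc
  exact absurd hc (by decide)

lemma pvSet_entry_ge (d : List Int) (i w : Int) (h : ∀ x ∈ d, -1 ≤ x) (hw : -1 ≤ w) :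
    ∀ x ∈ PySem.List.pySetD d i w, -1 ≤ x := by
  intro x hx
  simp only [PySem.List.pySetD, PySem.List.pySet?] at hx
  cases hk : PySem.List.pyIdx? d.length i with
  | none => rw [hk] at hx; exact h x hx
  | some k =>
    rw [hk] at hx
    simp only [Option.map_some, Option.getD_some] at hx
    rcases List.mem_or_eq_of_mem_set hx with h' | h'
    · exact h x h'
    · omega

lemma pvWrite_ge (d : List Int) (t : Int) (h : ∀ x ∈ d, -1 ≤ x) :
    -1 ≤ PySem.List.pyGetD d t (-2) + 1 := by
  rw [PySem.List.pyGetD]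
  cases hg : PySem.List.pyGet? d t with
  | none => simp
  | some y => have := h y (PySem.List.mem_of_pyGet?_eq_some d hg); simp; omega

-- flipping a -1 entry to a non-(-1) value lowers the -1 count by one
lemma pvCountSet : ∀ (l : List Int) (n : Nat) (v : Int), n < l.length →
    l.getD n (-2) = -1 → v ≠ -1 → (l.set n v).count (-1) + 1 = l.count (-1) := by
  intro l
  induction l with
  | nil => intro n v h; simp at h
  | cons a t ih =>
    intro n v hn ha hv
    cases n with
    | zero =>
      simp only [List.getD_cons_zero] at ha
      subst ha
      simp [hv]
    | succ n =>
      simp only [List.getD_cons_succ] at ha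
      simp only [List.set_cons_succ, List.count_cons]
      have := ih n v (by simpa using hn) ha hv
      omega

-- invariant: every entry of dist stays ≥ -1
lemma pvVisit_inv (dist nw : List Int) (t : Int) (js : List Int)
    (h : ∀ x ∈ dist, -1 ≤ x) : ∀ x ∈ (pvVisit dist nw t js).1, -1 ≤ x := by
  induction js generalizing dist nw with
  | nil => simpa [pvVisit] using h
  | cons j js ih =>
    by_cases hc : PySem.List.pyGetD dist j (-2) = -1 <;>
      simp only [pvVisit, hc, if_true, if_false]
    · exact ih _ _ (pvSet_entry_ge _ _ _ h (pvWrite_ge _ _ h))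
    · exact ih _ _ h

-- every newly appended vertex is a valid index
lemma pvVisit_new_valid (dist nw : List Int) (t : Int) (js : List Int)
    (h : ∀ x ∈ dist, -1 ≤ x) (hnw : ∀ j ∈ nw, pvValid dist.length j) :
    ∀ j ∈ (pvVisit dist nw t js).2, pvValid dist.length j := by
  induction js generalizing dist nw with
  | nil => simpa [pvVisit] using hnw
  | cons j js ih =>
    by_cases hc : PySem.List.pyGetD dist j (-2) = -1 <;>
      simp only [pvVisit, hc, if_true, if_false]
    · have hlen := PySem.List.length_pySetD dist j (PySem.List.pyGetD dist t (-2) + 1)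
      have := ih (PySem.List.pySetD dist j (PySem.List.pyGetD dist t (-2) + 1)) (nw ++ [j])
        (pvSet_entry_ge _ _ _ h (pvWrite_ge _ _ h))
        (by
          intro x hx
          rw [hlen]
          rcases List.mem_append.1 hx with h' | h'
          · exact hnw x h'
          · simp only [List.mem_singleton] at h'
            rw [h']; exact pvValid_of_hit dist j hc)
      rwa [hlen] at this
    · exact ih dist nw h hnw

-- measure accounting: each appended vertex flips one -1 entry to a value ≥ 0
lemma pvVisit_count (dist nw : List Int) (t : Int) (js : List Int)
    (h : ∀ x ∈ dist, -1 ≤ x) (ht : pvValid dist.length t) :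
    (pvVisit dist nw t js).1.count (-1) + (pvVisit dist nw t js).2.length ≤
      dist.count (-1) + nw.length := by
  induction js generalizing dist nw with
  | nil => simp [pvVisit]
  | cons j js ih =>
    by_cases hc : PySem.List.pyGetD dist j (-2) = -1 <;>
      simp only [pvVisit, hc, if_true, if_false]
    · have hj := pvValid_of_hit dist j hc
      obtain ⟨hk, hget, hset⟩ := pvValid_norm hj dist rfl (PySem.List.pyGetD dist t (-2) + 1) (-2)
      obtain ⟨hkt, hgett, -⟩ := pvValid_norm ht dist rfl 0 (-2)
      have hw : PySem.List.pyGetD dist t (-2) + 1 ≠ -1 := by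
        rw [hgett, List.getD_eq_getElem dist _ hkt]
        have := h _ (List.getElem_mem hkt)
        omega
      rw [hget] at hc
      have hcount := pvCountSet dist (pvNorm dist.length j) _ hk hc hw
      have hlen := PySem.List.length_pySetD dist j (PySem.List.pyGetD dist t (-2) + 1)
      have := ih (PySem.List.pySetD dist j (PySem.List.pyGetD dist t (-2) + 1)) (nw ++ [j])
        (pvSet_entry_ge _ _ _ h (pvWrite_ge _ _ h)) (by rw [hlen]; exact ht)
      rw [hset] at this ⊢
      simp only [List.length_append, List.length_cons, List.length_nil] at this ⊢
      omega
    · exact ih dist nw h ht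

-- level-synchronous frontier expansion (proof-side model of one BFS level)
def pvExpand (G : List (List Int)) (dist nw : List Int) : List Int → List Int × List Int
  | [] => (dist, nw)
  | t :: ts => let p := pvVisit dist nw t (PySem.List.pyGetD G t []); pvExpand G p.1 p.2 ts

def pvLevelLoop (G : List (List Int)) : Nat → List Int → List Int → List Int
  | _, [], dist => dist
  | 0, _ :: _, dist => dist
  | lf + 1, f :: fs, dist =>
    let p := pvExpand G dist [] (f :: fs)
    pvLevelLoop G lf p.2 p.1

lemma pvExpand_fst_length (G : List (List Int)) (dist nw : List Int) (F : List Int) :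
    (pvExpand G dist nw F).1.length = dist.length := by
  induction F generalizing dist nw with
  | nil => simp [pvExpand]
  | cons t ts ih => simp [pvExpand, ih, pvVisit_fst_length]

lemma pvExpand_acc (G : List (List Int)) (dist nw : List Int) (F : List Int) :
    (pvExpand G dist nw F).1 = (pvExpand G dist [] F).1 ∧
    (pvExpand G dist nw F).2 = nw ++ (pvExpand G dist [] F).2 := by
  induction F generalizing dist nw with
  | nil => simp [pvExpand]
  | cons t ts ih =>
    simp only [pvExpand]
    have hv := pvVisit_acc dist nw t (PySem.List.pyGetD G t [])
    constructor
    · rw [hv.1, (ih _ _).1, (ih _ (pvVisit dist [] t (PySem.List.pyGetD G t [])).2).1]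
    · rw [hv.1, hv.2, (ih _ _).2, (ih _ (pvVisit dist [] t (PySem.List.pyGetD G t [])).2).2,
        List.append_assoc]

lemma pvExpand_inv (G : List (List Int)) (dist nw : List Int) (F : List Int)
    (h : ∀ x ∈ dist, -1 ≤ x) : ∀ x ∈ (pvExpand G dist nw F).1, -1 ≤ x := by
  induction F generalizing dist nw with
  | nil => simpa [pvExpand] using h
  | cons t ts ih => exact ih _ _ (pvVisit_inv dist nw t _ h)

lemma pvExpand_new_valid (G : List (List Int)) (dist nw : List Int) (F : List Int)
    (h : ∀ x ∈ dist, -1 ≤ x) (hnw : ∀ j ∈ nw, pvValid dist.length j) :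
    ∀ j ∈ (pvExpand G dist nw F).2, pvValid dist.length j := by
  induction F generalizing dist nw with
  | nil => simpa [pvExpand] using hnw
  | cons t ts ih =>
    have hlen := pvVisit_fst_length dist nw t (PySem.List.pyGetD G t [])
    have := ih (pvVisit dist nw t (PySem.List.pyGetD G t [])).1
      (pvVisit dist nw t (PySem.List.pyGetD G t [])).2
      (pvVisit_inv dist nw t _ h) (by rw [hlen]; exact pvVisit_new_valid dist nw t _ h hnw)
    rw [hlen] at this
    exact this

lemma pvExpand_count (G : List (List Int)) (dist nw : List Int) (F : List Int)
    (h : ∀ x ∈ dist, -1 ≤ x) (hF : ∀ t ∈ F, pvValid dist.length t) :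
    (pvExpand G dist nw F).1.count (-1) + (pvExpand G dist nw F).2.length ≤
      dist.count (-1) + nw.length := by
  induction F generalizing dist nw with
  | nil => simp [pvExpand]
  | cons t ts ih =>
    have hlen := pvVisit_fst_length dist nw t (PySem.List.pyGetD G t [])
    have h1 := pvVisit_count dist nw t (PySem.List.pyGetD G t []) h (hF t (by simp))
    have h2 := ih (pvVisit dist nw t (PySem.List.pyGetD G t [])).1
      (pvVisit dist nw t (PySem.List.pyGetD G t [])).2
      (pvVisit_inv dist nw t _ h)
      (by rw [hlen]; intro u hu; exact hF u (by simp [hu]))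
    simp only [pvExpand]
    omega

-- flattening: running the queue loop through a whole block F performs one frontier expansion
lemma pvBfsLoop_flatten (G : List (List Int)) (F : List Int) :
    ∀ (q dist : List Int) (fuel : Nat), F.length ≤ fuel →
    pvBfsLoop G fuel (F ++ q) dist =
      pvBfsLoop G (fuel - F.length) (q ++ (pvExpand G dist [] F).2) (pvExpand G dist [] F).1 := by
  induction F with
  | nil => intro q dist fuel _; simp [pvExpand]
  | cons t F' ih =>
    intro q dist fuel hfl
    obtain ⟨f, rfl⟩ : ∃ f, fuel = f + 1 := ⟨fuel - 1, by simp at hfl; omega⟩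
    have hstep : pvBfsLoop G (f + 1) ((t :: F') ++ q) dist =
        pvBfsLoop G f ((F' ++ q) ++ (pvVisit dist [] t (PySem.List.pyGetD G t [])).2)
          (pvVisit dist [] t (PySem.List.pyGetD G t [])).1 := by
      simp only [List.cons_append, pvBfsLoop]
    rw [hstep, List.append_assoc,
      ih (q ++ (pvVisit dist [] t (PySem.List.pyGetD G t [])).2) _ f (by simp at hfl; omega)]
    have hexp : pvExpand G dist [] (t :: F') =
        pvExpand G (pvVisit dist [] t (PySem.List.pyGetD G t [])).1
          (pvVisit dist [] t (PySem.List.pyGetD G t [])).2 F' := by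
      simp only [pvExpand]
    have harith : f + 1 - (t :: F').length = f - F'.length := by simp
    rw [hexp,
      (pvExpand_acc G (pvVisit dist [] t (PySem.List.pyGetD G t [])).1
        (pvVisit dist [] t (PySem.List.pyGetD G t [])).2 F').1,
      (pvExpand_acc G (pvVisit dist [] t (PySem.List.pyGetD G t [])).1
        (pvVisit dist [] t (PySem.List.pyGetD G t [])).2 F').2,
      harith, ← List.append_assoc]

-- queue loop = level loop, by strong induction on the measure |q| + #(-1 entries)
lemma pvLoop_eq (G : List (List Int)) :
    ∀ (m fuel lf : Nat) (q dist : List Int),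
      (∀ x ∈ dist, -1 ≤ x) → (∀ t ∈ q, pvValid dist.length t) →
      q.length + dist.count (-1) ≤ m → q.length + dist.count (-1) ≤ fuel →
      q.length + dist.count (-1) ≤ lf →
      pvBfsLoop G fuel q dist = pvLevelLoop G lf q dist := by
  intro m
  induction m with
  | zero =>
    intro fuel lf q dist _ _ hm _ _
    have : q = [] := by cases q <;> simp at hm ⊢
    subst this
    cases fuel <;> cases lf <;> simp [pvBfsLoop, pvLevelLoop]
  | succ m ih =>
    intro fuel lf q dist h hq hm hf hl
    cases q with
    | nil => cases fuel <;> cases lf <;> simp [pvBfsLoop, pvLevelLoop]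
    | cons t q' =>
      obtain ⟨l, rfl⟩ : ∃ l, lf = l + 1 := ⟨lf - 1, by simp at hl; omega⟩
      have hflat := pvBfsLoop_flatten G (t :: q') [] dist fuel (by simp at hf ⊢; omega)
      rw [List.append_nil] at hflat
      rw [hflat, List.nil_append]
      have hcount := pvExpand_count G dist [] (t :: q') h (by simpa using hq)
      simp only [List.length_nil, Nat.add_zero] at hcount
      have hlen := pvExpand_fst_length G dist [] (t :: q')
      have hlevel : pvLevelLoop G (l + 1) (t :: q') dist =
          pvLevelLoop G l (pvExpand G dist [] (t :: q')).2 (pvExpand G dist [] (t :: q')).1 := by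
        simp only [pvLevelLoop]
      rw [hlevel]
      apply ih
      · exact pvExpand_inv G dist [] (t :: q') h
      · rw [hlen]; exact pvExpand_new_valid G dist [] (t :: q') h (by simp)
      · simp only [List.length_cons] at hm
        omega
      · simp only [List.length_cons] at hf ⊢
        omega
      · simp only [List.length_cons] at hl
        omega

lemma pvBfs_eq_level (G : List (List Int)) (N s : Int) (hs : pvValid N.toNat s) :
    pvBfs G N s = pvLevelLoop G (N.toNat + 1) [s]
      (PySem.List.pySetD (List.replicate N.toNat (-1)) s 0) := by
  unfold pvBfs
  have hlen : (PySem.List.pySetD (List.replicate N.toNat (-1 : Int)) s 0).length = N.toNat := by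
    simp [PySem.List.length_pySetD]
  apply pvLoop_eq G (N.toNat + 1)
  · intro x hx
    refine pvSet_entry_ge _ _ _ ?_ (by omega) x hx
    intro y hy
    have := List.eq_of_mem_replicate hy
    omega
  · intro t ht
    simp only [List.mem_singleton] at ht
    rw [ht, hlen]
    exact hs
  all_goals
    have := List.count_le_length (a := (-1 : Int)) (l := PySem.List.pySetD (List.replicate N.toNat (-1 : Int)) s 0)
    rw [hlen] at this
    simp only [List.length_cons, List.length_nil]
    omega

lemma pvBfsLoop_length (G : List (List Int)) :
    ∀ (fuel : Nat) (q dist : List Int), (pvBfsLoop G fuel q dist).length = dist.length := by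
  intro fuel
  induction fuel with
  | zero => intro q dist; cases q <;> simp [pvBfsLoop]
  | succ f ih => intro q dist; cases q <;> simp [pvBfsLoop, ih, pvVisit_fst_length]

lemma pvBfs_length (G : List (List Int)) (N s : Int) : (pvBfs G N s).length = N.toNat := by
  unfold pvBfs
  rw [pvBfsLoop_length]
  simp [PySem.List.length_pySetD]

-- ===== graph invariants (length, valid entries, wrap-symmetry) =====

def pvGInv (N' : Nat) (G : List (List Int)) : Prop :=
  G.length = N' ∧
  (∀ a : Nat, ∀ j ∈ G.getD a [], pvValid N' j) ∧
  (∀ a b : Nat, (∃ j ∈ G.getD a [], pvNorm N' j = b) → ∃ j ∈ G.getD b [], pvNorm N' j = a)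

lemma pvGetD_set {α : Type} (l : List α) (m b : Nat) (v d : α) :
    (l.set m v).getD b d = if b = m ∧ m < l.length then v else l.getD b d := by
  simp only [List.getD_eq_getElem?_getD, List.getElem?_set]
  by_cases h1 : m = b
  · subst h1
    by_cases h2 : m < l.length
    · simp [h2]
    · have hnone : l[m]? = none := by rw [List.getElem?_eq_none_iff]; omega
      simp [h2]
  · have hne : ¬(b = m ∧ m < l.length) := fun h => h1 h.1.symm
    simp [h1, hne]

lemma pvAppendAt_getD (N' : Nat) (G : List (List Int)) (i x : Int)
    (hlen : G.length = N') (hi : pvValid N' i) (b : Nat) :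
    (pvAppendAt G i x).getD b [] =
      if b = pvNorm N' i then G.getD b [] ++ [x] else G.getD b [] := by
  obtain ⟨hk, hget, hset⟩ := pvValid_norm hi G hlen (PySem.List.pyGetD G i [] ++ [x]) []
  unfold pvAppendAt
  rw [hset, pvGetD_set, hget]
  by_cases h2 : b = pvNorm N' i
  · rw [if_pos ⟨h2, by omega⟩, if_pos h2, h2]
  · rw [if_neg (fun h => h2 h.1), if_neg h2]

lemma pvAppendAt_length (G : List (List Int)) (i x : Int) :
    (pvAppendAt G i x).length = G.length := by
  simp [pvAppendAt, PySem.List.length_pySetD]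

lemma pvGInv_edge (N' : Nat) (G : List (List Int)) (u v : Int)
    (hG : pvGInv N' G) (hu : pvValid N' u) (hv : pvValid N' v) :
    pvGInv N' (pvAppendAt (pvAppendAt G u v) v u) := by
  obtain ⟨hlen, hval, hsym⟩ := hG
  have hlen1 : (pvAppendAt G u v).length = N' := by rw [pvAppendAt_length, hlen]
  have hlen2 : (pvAppendAt (pvAppendAt G u v) v u).length = N' := by
    rw [pvAppendAt_length, hlen1]
  have hget : ∀ b : Nat, (pvAppendAt (pvAppendAt G u v) v u).getD b [] =
      (if b = pvNorm N' v then (if b = pvNorm N' u then G.getD b [] ++ [v] else G.getD b []) ++ [u]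
       else (if b = pvNorm N' u then G.getD b [] ++ [v] else G.getD b [])) := by
    intro b
    rw [pvAppendAt_getD N' _ v u hlen1 hv b, pvAppendAt_getD N' G u v hlen hu b]
  have hnewu : u ∈ (pvAppendAt (pvAppendAt G u v) v u).getD (pvNorm N' v) [] := by
    rw [hget (pvNorm N' v), if_pos rfl]
    simp
  have hnewv : v ∈ (pvAppendAt (pvAppendAt G u v) v u).getD (pvNorm N' u) [] := by
    rw [hget (pvNorm N' u)]
    split_ifs <;> simp_all
  have hmem : ∀ c : Nat, ∀ w, w ∈ G.getD c [] → w ∈ (pvAppendAt (pvAppendAt G u v) v u).getD c [] := by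
    intro c w hw
    rw [hget c]
    split_ifs <;> (try simp only [List.mem_append, List.mem_singleton]) <;> tauto
  refine ⟨hlen2, ?_, ?_⟩
  · intro a j hj
    rw [hget a] at hj
    have hcls : j ∈ G.getD a [] ∨ j = v ∨ j = u := by
      split_ifs at hj <;> (try simp only [List.mem_append, List.mem_singleton] at hj) <;> tauto
    rcases hcls with h | h | h
    · exact hval a j h
    · rw [h]; exact hv
    · rw [h]; exact hu
  · intro a b hab
    obtain ⟨j, hj, hjb⟩ := hab
    rw [hget a] at hj
    have hcls : j ∈ G.getD a [] ∨ (a = pvNorm N' u ∧ j = v) ∨ (a = pvNorm N' v ∧ j = u) := by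
      split_ifs at hj <;> (try simp only [List.mem_append, List.mem_singleton] at hj) <;> tauto
    rcases hcls with h | ⟨ha, hjv⟩ | ⟨ha, hju⟩
    · obtain ⟨j', hj', hj'a⟩ := hsym a b ⟨j, h, hjb⟩
      exact ⟨j', hmem b j' hj', hj'a⟩
    · subst hjv; subst ha; rw [← hjb]; exact ⟨u, hnewu, rfl⟩
    · subst hju; subst ha; rw [← hjb]; exact ⟨v, hnewv, rfl⟩

lemma pvFold_inv (N : Int) (hN : 1 ≤ N) :
    ∀ (es : List (Int × Int)) (G₀ : List (List Int)),
      (∀ e ∈ es, (1 - N ≤ e.1 ∧ e.1 ≤ N) ∧ (1 - N ≤ e.2 ∧ e.2 ≤ N)) →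
      pvGInv N.toNat G₀ →
      pvGInv N.toNat (es.foldl
        (fun G e => pvAppendAt (pvAppendAt G (e.1 - 1) (e.2 - 1)) (e.2 - 1) (e.1 - 1)) G₀)
  | [], _, _, h => h
  | e :: es, G₀, he, h => by
    simp only [List.foldl_cons]
    apply pvFold_inv N hN es _ (fun x hx => he x (by simp [hx]))
    have hb := he e (by simp)
    refine pvGInv_edge _ _ _ _ h ?_ ?_ <;> unfold pvValid <;> omega

lemma pvBuildG_inv (N : Int) (edges : List (Int × Int)) (hN : 1 ≤ N)
    (he : ∀ e ∈ edges, (1 - N ≤ e.1 ∧ e.1 ≤ N) ∧ (1 - N ≤ e.2 ∧ e.2 ≤ N)) :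
    pvGInv N.toNat (pvBuildG N edges) := by
  unfold pvBuildG
  apply pvFold_inv N hN edges _ he
  refine ⟨by simp, ?_, ?_⟩
  · intro a j hj
    rcases Nat.lt_or_ge a N.toNat with h | h
    · rw [List.getD_eq_getElem _ _ (by simpa using h), List.getElem_replicate] at hj
      simp at hj
    · rw [List.getD_eq_default _ _ (by simpa using h)] at hj
      simp at hj
  · intro a b hab
    obtain ⟨j, hj, -⟩ := hab
    rcases Nat.lt_or_ge a N.toNat with h | h
    · rw [List.getD_eq_getElem _ _ (by simpa using h), List.getElem_replicate] at hj
      simp at hj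
    · rw [List.getD_eq_default _ _ (by simpa using h)] at hj
      simp at hj

-- ===== pointwise characterisation of one frontier expansion =====

lemma pvVisit_char (N' : Nat) (t k : Int) (hk : 0 ≤ k) :
    ∀ (js dist nw : List Int), dist.length = N' → (∀ j ∈ js, pvValid N' j) →
      pvValid N' t → dist.getD (pvNorm N' t) (-2) = k →
      (∀ b : Nat, (pvVisit dist nw t js).1.getD b (-2) =
          if dist.getD b (-2) = -1 ∧ ∃ j ∈ js, pvNorm N' j = b then k + 1
          else dist.getD b (-2)) ∧
      (∀ b : Nat, (∃ j ∈ (pvVisit dist nw t js).2, pvNorm N' j = b) ↔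
          (∃ j ∈ nw, pvNorm N' j = b) ∨
            (dist.getD b (-2) = -1 ∧ ∃ j ∈ js, pvNorm N' j = b)) := by
  intro js
  induction js with
  | nil =>
    intro dist nw hd hjs ht htv
    constructor
    · intro b
      rw [if_neg (by rintro ⟨-, j, hj, -⟩; simp at hj)]
      simp [pvVisit]
    · intro b
      simp [pvVisit]
  | cons j js ih =>
    intro dist nw hd hjs ht htv
    have hjv : pvValid N' j := hjs j (by simp)
    obtain ⟨hjlt, hjget, hjset⟩ := pvValid_norm hjv dist hd (PySem.List.pyGetD dist t (-2) + 1) (-2)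
    obtain ⟨htlt, htget, -⟩ := pvValid_norm ht dist hd 0 (-2)
    by_cases hc : PySem.List.pyGetD dist j (-2) = -1
    · have hcb : dist.getD (pvNorm N' j) (-2) = -1 := by rw [← hjget]; exact hc
      have hval : PySem.List.pyGetD dist t (-2) = k := by rw [htget]; exact htv
      simp only [pvVisit, if_pos hc]
      have hdist1 : PySem.List.pySetD dist j (PySem.List.pyGetD dist t (-2) + 1) =
          dist.set (pvNorm N' j) (k + 1) := by rw [hjset, hval]
      rw [hdist1]
      have hd1 : (dist.set (pvNorm N' j) (k + 1)).length = N' := by simp [hd]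
      have hget1 : ∀ b : Nat, (dist.set (pvNorm N' j) (k + 1)).getD b (-2) =
          if b = pvNorm N' j then k + 1 else dist.getD b (-2) := by
        intro b
        rw [pvGetD_set]
        by_cases hb : b = pvNorm N' j
        · rw [if_pos ⟨hb, by omega⟩, if_pos hb]
        · rw [if_neg (fun h => hb h.1), if_neg hb]
      have ht1 : (dist.set (pvNorm N' j) (k + 1)).getD (pvNorm N' t) (-2) = k := by
        rw [hget1, if_neg]
        · exact htv
        · intro h
          rw [h] at htv
          omega
      obtain ⟨IH1, IH2⟩ := ih (dist.set (pvNorm N' j) (k + 1)) (nw ++ [j]) hd1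
        (fun x hx => hjs x (by simp [hx])) ht ht1
      constructor
      · intro b
        rw [IH1 b, hget1 b]
        by_cases hb : b = pvNorm N' j
        · rw [if_pos hb, if_neg (by rintro ⟨h, -⟩; omega),
            if_pos ⟨by rw [hb]; exact hcb, ⟨j, by simp, hb.symm⟩⟩]
        · rw [if_neg hb]
          have hiff : (dist.getD b (-2) = -1 ∧ ∃ x ∈ js, pvNorm N' x = b) ↔
              (dist.getD b (-2) = -1 ∧ ∃ x ∈ j :: js, pvNorm N' x = b) := by
            constructor
            · rintro ⟨h1, x, hx, hx2⟩
              exact ⟨h1, x, by simp [hx], hx2⟩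
            · rintro ⟨h1, x, hx, hx2⟩
              rcases List.mem_cons.1 hx with rfl | hx'
              · exact absurd hx2.symm hb
              · exact ⟨h1, x, hx', hx2⟩
          by_cases hcond : dist.getD b (-2) = -1 ∧ ∃ x ∈ js, pvNorm N' x = b
          · rw [if_pos hcond, if_pos (hiff.1 hcond)]
          · rw [if_neg hcond, if_neg (fun h => hcond (hiff.2 h))]
      · intro b
        rw [IH2 b]
        have h1 : (∃ x ∈ nw ++ [j], pvNorm N' x = b) ↔
            (∃ x ∈ nw, pvNorm N' x = b) ∨ pvNorm N' j = b := by
          constructor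
          · rintro ⟨x, hx, hxb⟩
            rcases List.mem_append.1 hx with h | h
            · exact Or.inl ⟨x, h, hxb⟩
            · simp only [List.mem_singleton] at h
              subst h
              exact Or.inr hxb
          · rintro (⟨x, hx, hxb⟩ | h)
            · exact ⟨x, List.mem_append_left _ hx, hxb⟩
            · exact ⟨j, by simp, h⟩
        have h2 : (dist.set (pvNorm N' j) (k + 1)).getD b (-2) = -1 ↔
            (b ≠ pvNorm N' j ∧ dist.getD b (-2) = -1) := by
          rw [hget1 b]
          by_cases hb : b = pvNorm N' j
          · rw [if_pos hb]
            constructor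
            · intro h; omega
            · rintro ⟨h, -⟩; exact absurd hb h
          · rw [if_neg hb]; tauto
        have h3 : (∃ x ∈ j :: js, pvNorm N' x = b) ↔
            (pvNorm N' j = b ∨ ∃ x ∈ js, pvNorm N' x = b) := by
          constructor
          · rintro ⟨x, hx, hxb⟩
            rcases List.mem_cons.1 hx with rfl | hx'
            · exact Or.inl hxb
            · exact Or.inr ⟨x, hx', hxb⟩
          · rintro (h | ⟨x, hx, hxb⟩)
            · exact ⟨j, by simp, h⟩
            · exact ⟨x, by simp [hx], hxb⟩
        rw [h1, h2, h3]
        have hcbb : pvNorm N' j = b → dist.getD b (-2) = -1 := fun h => by rw [← h]; exact hcb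
        constructor
        · rintro ((h | h) | ⟨⟨-, hdb⟩, hE⟩)
          · exact Or.inl h
          · exact Or.inr ⟨hcbb h, Or.inl h⟩
          · exact Or.inr ⟨hdb, Or.inr hE⟩
        · rintro (h | ⟨hdb, h | hE⟩)
          · exact Or.inl (Or.inl h)
          · exact Or.inl (Or.inr h)
          · by_cases hbj : pvNorm N' j = b
            · exact Or.inl (Or.inr hbj)
            · exact Or.inr ⟨⟨fun hh => hbj hh.symm, hdb⟩, hE⟩
    · simp only [pvVisit, if_neg hc]
      have hcb : dist.getD (pvNorm N' j) (-2) ≠ -1 := by rw [← hjget]; exact hc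
      obtain ⟨IH1, IH2⟩ := ih dist nw hd (fun x hx => hjs x (by simp [hx])) ht htv
      have hiff : ∀ b : Nat, (dist.getD b (-2) = -1 ∧ ∃ x ∈ js, pvNorm N' x = b) ↔
          (dist.getD b (-2) = -1 ∧ ∃ x ∈ j :: js, pvNorm N' x = b) := by
        intro b
        constructor
        · rintro ⟨h1, x, hx, hx2⟩
          exact ⟨h1, x, by simp [hx], hx2⟩
        · rintro ⟨h1, x, hx, hx2⟩
          rcases List.mem_cons.1 hx with rfl | hx'
          · rw [hx2] at hcb; exact absurd h1 hcb
          · exact ⟨h1, x, hx', hx2⟩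
      constructor
      · intro b
        rw [IH1 b]
        by_cases hcond : dist.getD b (-2) = -1 ∧ ∃ x ∈ js, pvNorm N' x = b
        · rw [if_pos hcond, if_pos ((hiff b).1 hcond)]
        · rw [if_neg hcond, if_neg (fun h => hcond ((hiff b).2 h))]
      · intro b
        rw [IH2 b]
        constructor
        · rintro (h | h)
          · exact Or.inl h
          · exact Or.inr ((hiff b).1 h)
        · rintro (h | h)
          · exact Or.inl h
          · exact Or.inr ((hiff b).2 h)

lemma pvExpand_char (N' : Nat) (G : List (List Int)) (k : Int) (hk : 0 ≤ k)
    (hGlen : G.length = N') (hGv : ∀ a : Nat, ∀ j ∈ G.getD a [], pvValid N' j) :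
    ∀ (F dist : List Int), dist.length = N' → (∀ t ∈ F, pvValid N' t) →
      (∀ t ∈ F, dist.getD (pvNorm N' t) (-2) = k) →
      (∀ b : Nat, (pvExpand G dist [] F).1.getD b (-2) =
          if dist.getD b (-2) = -1 ∧
             ∃ t ∈ F, ∃ j ∈ G.getD (pvNorm N' t) [], pvNorm N' j = b then k + 1
          else dist.getD b (-2)) ∧
      (∀ b : Nat, (∃ j ∈ (pvExpand G dist [] F).2, pvNorm N' j = b) ↔
          (dist.getD b (-2) = -1 ∧
            ∃ t ∈ F, ∃ j ∈ G.getD (pvNorm N' t) [], pvNorm N' j = b)) := by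
  intro F
  induction F with
  | nil =>
    intro dist hd hF1 hF2
    constructor
    · intro b
      rw [if_neg (by rintro ⟨-, t, ht, -⟩; simp at ht)]
      simp [pvExpand]
    · intro b
      simp [pvExpand]
  | cons t ts ih =>
    intro dist hd hF1 hF2
    have htv : pvValid N' t := hF1 t (by simp)
    obtain ⟨htlt, htget, -⟩ := pvValid_norm htv G hGlen [] []
    simp only [pvExpand]
    rw [htget]
    have hjsv : ∀ j ∈ G.getD (pvNorm N' t) [], pvValid N' j := hGv (pvNorm N' t)
    have htd : dist.getD (pvNorm N' t) (-2) = k := hF2 t (by simp)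
    obtain ⟨V1, V2⟩ := pvVisit_char N' t k hk (G.getD (pvNorm N' t) []) dist [] hd hjsv htv htd
    have hacc := pvExpand_acc G (pvVisit dist [] t (G.getD (pvNorm N' t) [])).1
      (pvVisit dist [] t (G.getD (pvNorm N' t) [])).2 ts
    have hd1 : (pvVisit dist [] t (G.getD (pvNorm N' t) [])).1.length = N' := by
      rw [pvVisit_fst_length, hd]
    have hts1 : ∀ u ∈ ts, pvValid N' u := fun u hu => hF1 u (by simp [hu])
    have htd1 : ∀ u ∈ ts, (pvVisit dist [] t (G.getD (pvNorm N' t) [])).1.getD (pvNorm N' u) (-2) = k := by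
      intro u hu
      rw [V1, if_neg]
      · exact hF2 u (by simp [hu])
      · rintro ⟨h1, -⟩
        rw [hF2 u (by simp [hu])] at h1
        omega
    obtain ⟨E1, E2⟩ := ih (pvVisit dist [] t (G.getD (pvNorm N' t) [])).1 hd1 hts1 htd1
    have hconsEx : ∀ b : Nat, (∃ u ∈ t :: ts, ∃ j ∈ G.getD (pvNorm N' u) [], pvNorm N' j = b) ↔
        ((∃ j ∈ G.getD (pvNorm N' t) [], pvNorm N' j = b) ∨
          (∃ u ∈ ts, ∃ j ∈ G.getD (pvNorm N' u) [], pvNorm N' j = b)) := by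
      intro b
      constructor
      · rintro ⟨u, hu, hj⟩
        rcases List.mem_cons.1 hu with rfl | hu'
        · exact Or.inl hj
        · exact Or.inr ⟨u, hu', hj⟩
      · rintro (h | ⟨u, hu, hj⟩)
        · exact ⟨t, by simp, h⟩
        · exact ⟨u, by simp [hu], hj⟩
    constructor
    · intro b
      rw [hacc.1, E1 b, V1 b]
      by_cases hdb : dist.getD b (-2) = -1
      · by_cases hC1 : ∃ j ∈ G.getD (pvNorm N' t) [], pvNorm N' j = b
        · have hin : (if dist.getD b (-2) = -1 ∧ ∃ j ∈ G.getD (pvNorm N' t) [], pvNorm N' j = b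
              then k + 1 else dist.getD b (-2)) = k + 1 := if_pos ⟨hdb, hC1⟩
          rw [hin, if_neg (by rintro ⟨h, -⟩; omega),
            if_pos ⟨hdb, (hconsEx b).2 (Or.inl hC1)⟩]
        · have hin : (if dist.getD b (-2) = -1 ∧ ∃ j ∈ G.getD (pvNorm N' t) [], pvNorm N' j = b
              then k + 1 else dist.getD b (-2)) = dist.getD b (-2) := if_neg (fun h => hC1 h.2)
          rw [hin]
          by_cases hCts : ∃ u ∈ ts, ∃ j ∈ G.getD (pvNorm N' u) [], pvNorm N' j = b
          · rw [if_pos ⟨hdb, hCts⟩, if_pos ⟨hdb, (hconsEx b).2 (Or.inr hCts)⟩]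
          · rw [if_neg (fun h => hCts h.2), if_neg]
            rintro ⟨-, hx⟩
            rcases (hconsEx b).1 hx with h | h
            · exact hC1 h
            · exact hCts h
      · have hin : (if dist.getD b (-2) = -1 ∧ ∃ j ∈ G.getD (pvNorm N' t) [], pvNorm N' j = b
            then k + 1 else dist.getD b (-2)) = dist.getD b (-2) := if_neg (fun h => hdb h.1)
        rw [hin, if_neg (fun h => hdb h.1), if_neg (fun h => hdb h.1)]
    · intro b
      rw [hacc.2]
      have hsplit : (∃ j ∈ (pvVisit dist [] t (G.getD (pvNorm N' t) [])).2 ++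
            (pvExpand G (pvVisit dist [] t (G.getD (pvNorm N' t) [])).1 [] ts).2, pvNorm N' j = b) ↔
          ((∃ j ∈ (pvVisit dist [] t (G.getD (pvNorm N' t) [])).2, pvNorm N' j = b) ∨
            (∃ j ∈ (pvExpand G (pvVisit dist [] t (G.getD (pvNorm N' t) [])).1 [] ts).2, pvNorm N' j = b)) := by
        constructor
        · rintro ⟨x, hx, hb2⟩
          rcases List.mem_append.1 hx with h | h
          · exact Or.inl ⟨x, h, hb2⟩
          · exact Or.inr ⟨x, h, hb2⟩
        · rintro (⟨x, hx, hb2⟩ | ⟨x, hx, hb2⟩)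
          · exact ⟨x, List.mem_append_left _ hx, hb2⟩
          · exact ⟨x, List.mem_append_right _ hx, hb2⟩
      have hd1b : (pvVisit dist [] t (G.getD (pvNorm N' t) [])).1.getD b (-2) = -1 ↔
          (dist.getD b (-2) = -1 ∧ ¬(dist.getD b (-2) = -1 ∧ ∃ j ∈ G.getD (pvNorm N' t) [], pvNorm N' j = b)) := by
        rw [V1 b]
        by_cases hC : dist.getD b (-2) = -1 ∧ ∃ j ∈ G.getD (pvNorm N' t) [], pvNorm N' j = b
        · rw [if_pos hC]
          constructor
          · intro h; omega
          · rintro ⟨-, hn⟩; exact absurd hC hn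
        · rw [if_neg hC]
          exact ⟨fun h => ⟨h, hC⟩, fun h => h.1⟩
      have hnil : ¬∃ j ∈ ([] : List Int), pvNorm N' j = b := by simp
      rw [hsplit, V2 b, E2 b, hd1b, hconsEx b]
      constructor
      · rintro ((h | ⟨hdb, hC⟩) | ⟨⟨hdb, -⟩, hCts⟩)
        · exact absurd h hnil
        · exact ⟨hdb, Or.inl hC⟩
        · exact ⟨hdb, Or.inr hCts⟩
      · rintro ⟨hdb, h | h⟩
        · exact Or.inl (Or.inr ⟨hdb, h⟩)
        · by_cases hC : ∃ j ∈ G.getD (pvNorm N' t) [], pvNorm N' j = b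
          · exact Or.inl (Or.inr ⟨hdb, hC⟩)
          · exact Or.inr ⟨⟨hdb, fun hh => hC hh.2⟩, h⟩

-- ===== sweep round = frontier expansion, and the loops agree =====

lemma pvRound_eq_expand (N : Int) (N' : Nat) (hNN : N.toNat = N')
    (G : List (List Int)) (hGlen : G.length = N')
    (hGv : ∀ a : Nat, ∀ j ∈ G.getD a [], pvValid N' j)
    (hsym : ∀ a b : Nat, (∃ j ∈ G.getD a [], pvNorm N' j = b) → ∃ j ∈ G.getD b [], pvNorm N' j = a)
    (k : Int) (hk : 0 ≤ k) (F dist : List Int) (hd : dist.length = N')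
    (HF1 : ∀ t ∈ F, pvValid N' t)
    (HF2 : ∀ t ∈ F, dist.getD (pvNorm N' t) (-2) = k)
    (HF3 : ∀ b : Nat, dist.getD b (-2) = k → ∃ t ∈ F, pvNorm N' t = b) :
    pvRound G N dist k = (pvExpand G dist [] F).1 := by
  obtain ⟨E1, -⟩ := pvExpand_char N' G k hk hGlen hGv F dist hd HF1 HF2
  apply List.ext_getElem
  · simp [pvRound, PySem.List.length_pyRange_one, pvExpand_fst_length, hd, hNN]
  · intro i h1 h2
    have hi : i < N' := by
      simpa [pvRound, PySem.List.length_pyRange_one, hNN] using h1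
    unfold pvRound
    rw [List.getElem_map, PySem.List.getElem_pyRange_one 0 N i (by simpa [hNN] using hi), zero_add]
    have hvi : pvValid N' (i : Int) := by unfold pvValid; constructor <;> omega
    have hnormi : pvNorm N' (i : Int) = i := by unfold pvNorm; simp
    obtain ⟨-, hgd, -⟩ := pvValid_norm hvi dist hd 0 (-2)
    obtain ⟨-, hgG, -⟩ := pvValid_norm hvi G hGlen [] []
    rw [hgd, hgG, hnormi]
    have hany : (((G.getD i []).any (fun j => PySem.List.pyGetD dist j (-2) == k)) = true) ↔
        (∃ j ∈ G.getD i [], dist.getD (pvNorm N' j) (-2) = k) := by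
      rw [List.any_eq_true]
      constructor
      · rintro ⟨j, hj, hjk⟩
        obtain ⟨-, hg, -⟩ := pvValid_norm (hGv i j hj) dist hd 0 (-2)
        exact ⟨j, hj, by rw [← hg]; exact beq_iff_eq.1 hjk⟩
      · rintro ⟨j, hj, hjk⟩
        obtain ⟨-, hg, -⟩ := pvValid_norm (hGv i j hj) dist hd 0 (-2)
        exact ⟨j, hj, beq_iff_eq.2 (by rw [hg]; exact hjk)⟩
    have hcond : (∃ j ∈ G.getD i [], dist.getD (pvNorm N' j) (-2) = k) ↔
        (∃ t ∈ F, ∃ j ∈ G.getD (pvNorm N' t) [], pvNorm N' j = i) := by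
      constructor
      · rintro ⟨j, hj, hjk⟩
        obtain ⟨tq, htq, htqb⟩ := HF3 (pvNorm N' j) hjk
        obtain ⟨j', hj', hj'i⟩ := hsym i (pvNorm N' tq) ⟨j, hj, htqb.symm⟩
        exact ⟨tq, htq, j', hj', hj'i⟩
      · rintro ⟨tq, htq, j, hj, hji⟩
        obtain ⟨j', hjm, hjn⟩ := hsym (pvNorm N' tq) i ⟨j, hj, hji⟩
        exact ⟨j', hjm, by rw [hjn]; exact HF2 tq htq⟩
    rw [show (pvExpand G dist [] F).1[i]'h2 = (pvExpand G dist [] F).1.getD i (-2) from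
      (List.getD_eq_getElem _ _ h2).symm, E1 i]
    by_cases hdb : dist.getD i (-2) = -1
    · by_cases hx : ∃ t ∈ F, ∃ j ∈ G.getD (pvNorm N' t) [], pvNorm N' j = i
      · rw [if_pos ⟨hdb, hany.2 (hcond.2 hx)⟩, if_pos ⟨hdb, hx⟩]
      · rw [if_neg (by rintro ⟨-, h⟩; exact hx (hcond.1 (hany.1 h))), if_neg (fun h => hx h.2)]
    · rw [if_neg (fun h => hdb h.1), if_neg (fun h => hdb h.1)]

lemma pvSweepLoop_eq (N : Int) (N' : Nat) (hNN : N.toNat = N')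
    (G : List (List Int)) (hGlen : G.length = N')
    (hGv : ∀ a : Nat, ∀ j ∈ G.getD a [], pvValid N' j)
    (hsym : ∀ a b : Nat, (∃ j ∈ G.getD a [], pvNorm N' j = b) → ∃ j ∈ G.getD b [], pvNorm N' j = a) :
    ∀ (d k : Nat) (F dist : List Int), N' - k = d → k ≤ N' →
      dist.length = N' →
      (∀ t ∈ F, pvValid N' t) →
      (∀ t ∈ F, dist.getD (pvNorm N' t) (-2) = (k : Int)) →
      (∀ b : Nat, dist.getD b (-2) = (k : Int) → ∃ t ∈ F, pvNorm N' t = b) →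
      (∀ x ∈ dist, -1 ≤ x) →
      (∀ b : Nat, dist.getD b (-2) ≤ (k : Int)) →
      F.length + dist.count (-1) + k ≤ N' →
      pvLevelLoop G (N' - k + 1) F dist =
        pvDistLoop G N (PySem.List.pyRange (k : Int) N 1) dist := by
  intro d
  induction d with
  | zero =>
    intro k F dist hdk hkN hd HF1 HF2 HF3 HLo HHi Hcnt
    have hkN' : k = N' := by omega
    subst hkN'
    have hrange : PySem.List.pyRange (k : Int) N 1 = [] :=
      PySem.List.pyRange_one_eq_nil (by omega)
    rw [hrange]
    have hF : F = [] := by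
      cases F with
      | nil => rfl
      | cons a l => simp only [List.length_cons] at Hcnt; omega
    subst hF
    simp [pvLevelLoop, pvDistLoop]
  | succ d ih =>
    intro k F dist hdk hkN hd HF1 HF2 HF3 HLo HHi Hcnt
    have hkN' : k < N' := by omega
    have hkltN : (k : Int) < N := by omega
    have hk0 : (0 : Int) ≤ (k : Int) := by omega
    rw [PySem.List.pyRange_one_cons hkltN]
    cases F with
    | nil =>
      have hround : pvRound G N dist (k : Int) = dist := by
        have h := pvRound_eq_expand N N' hNN G hGlen hGv hsym (k : Int) hk0 [] dist hd
          (by simp) (by simp) HF3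
        simpa [pvExpand] using h
      have hbreak : pvDistLoop G N ((k : Int) :: PySem.List.pyRange ((k : Int) + 1) N 1) dist = dist := by
        simp [pvDistLoop, hround]
      rw [hbreak]
      simp [pvLevelLoop]
    | cons f fs =>
      obtain ⟨E1, E2⟩ := pvExpand_char N' G (k : Int) hk0 hGlen hGv (f :: fs) dist hd HF1 HF2
      have hround : pvRound G N dist (k : Int) = (pvExpand G dist [] (f :: fs)).1 :=
        pvRound_eq_expand N N' hNN G hGlen hGv hsym (k : Int) hk0 (f :: fs) dist hd HF1 HF2 HF3
      have hd' : (pvExpand G dist [] (f :: fs)).1.length = N' := by rw [pvExpand_fst_length, hd]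
      have hvF : ∀ t ∈ (f :: fs), pvValid dist.length t := by rw [hd]; exact HF1
      have hcnt' := pvExpand_count G dist [] (f :: fs) HLo hvF
      have hnewvalid := pvExpand_new_valid G dist [] (f :: fs) HLo (by simp)
      have hstep : pvLevelLoop G (N' - k + 1) (f :: fs) dist =
          pvLevelLoop G (N' - k) (pvExpand G dist [] (f :: fs)).2 (pvExpand G dist [] (f :: fs)).1 := by
        simp only [pvLevelLoop]
      rw [hstep]
      by_cases hFnil : (pvExpand G dist [] (f :: fs)).2 = []
      · have hdd : (pvExpand G dist [] (f :: fs)).1 = dist := by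
          apply List.ext_getElem (by rw [hd', hd])
          intro i hh1 hh2
          have hgd : (pvExpand G dist [] (f :: fs)).1.getD i (-2) = dist.getD i (-2) := by
            rw [E1 i, if_neg]
            rintro ⟨hdb, hadj⟩
            obtain ⟨j, hj, -⟩ := (E2 i).2 ⟨hdb, hadj⟩
            rw [hFnil] at hj
            simp at hj
          rw [List.getD_eq_getElem _ _ hh1, List.getD_eq_getElem _ _ hh2] at hgd
          exact hgd
        have hbreak : pvDistLoop G N ((k : Int) :: PySem.List.pyRange ((k : Int) + 1) N 1) dist = dist := by
          simp [pvDistLoop, hround, hdd]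
        rw [hbreak, hFnil, hdd]
        simp [pvLevelLoop]
      · have hdd : (pvExpand G dist [] (f :: fs)).1 ≠ dist := by
          obtain ⟨f', hf'⟩ := List.exists_mem_of_ne_nil _ hFnil
          have hb := (E2 (pvNorm N' f')).1 ⟨f', hf', rfl⟩
          have hval : (pvExpand G dist [] (f :: fs)).1.getD (pvNorm N' f') (-2) = (k : Int) + 1 := by
            rw [E1, if_pos hb]
          intro heq
          rw [heq, hb.1] at hval
          omega
        have hcont : pvDistLoop G N ((k : Int) :: PySem.List.pyRange ((k : Int) + 1) N 1) dist =
            pvDistLoop G N (PySem.List.pyRange ((k : Int) + 1) N 1) (pvExpand G dist [] (f :: fs)).1 := by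
          simp only [pvDistLoop]
          rw [hround, if_neg hdd]
        rw [hcont]
        have hsucc : (k : Int) + 1 = ((k + 1 : Nat) : Int) := by push_cast; ring
        rw [hsucc]
        have harith : N' - k = N' - (k + 1) + 1 := by omega
        rw [harith]
        apply ih (k + 1) (pvExpand G dist [] (f :: fs)).2 (pvExpand G dist [] (f :: fs)).1
          (by omega) (by omega) hd'
        · intro t ht
          have := hnewvalid t ht
          rwa [hd] at this
        · intro t ht
          have hb := (E2 (pvNorm N' t)).1 ⟨t, ht, rfl⟩
          rw [E1, if_pos hb]
          push_cast
          ring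
        · intro b hb
          rw [E1 b] at hb
          by_cases hC : dist.getD b (-2) = -1 ∧
              ∃ t ∈ (f :: fs), ∃ j ∈ G.getD (pvNorm N' t) [], pvNorm N' j = b
          · exact (E2 b).2 hC
          · rw [if_neg hC] at hb
            have := HHi b
            exfalso
            omega
        · exact pvExpand_inv G dist [] (f :: fs) HLo
        · intro b
          rw [E1 b]
          split_ifs with h
          · push_cast; omega
          · have := HHi b; push_cast; omega
        · simp only [List.length_nil, Nat.add_zero] at hcnt'
          simp only [List.length_cons] at Hcnt
          omega

lemma pvBfs_eq_distances (N : Int) (hN : 1 ≤ N) (G : List (List Int))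
    (hG : pvGInv N.toNat G) (s : Int) (hs0 : 0 ≤ s) (hsN : s < N) :
    pvBfs G N s = pvDistances G N s := by
  obtain ⟨hGlen, hGv, hsym⟩ := hG
  have hvs : pvValid N.toNat s := by unfold pvValid; omega
  rw [pvBfs_eq_level G N s hvs]
  unfold pvDistances
  obtain ⟨hlt, -, hset⟩ := pvValid_norm hvs (List.replicate N.toNat (-1 : Int)) (by simp) 0 (-2)
  have hd0' : PySem.List.pySetD (List.replicate N.toNat (-1 : Int)) s 0 =
      (List.replicate N.toNat (-1 : Int)).set (pvNorm N.toNat s) 0 := hset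
  have hlen0 : (PySem.List.pySetD (List.replicate N.toNat (-1 : Int)) s 0).length = N.toNat := by
    simp [PySem.List.length_pySetD]
  have hget0 : ∀ b : Nat, (PySem.List.pySetD (List.replicate N.toNat (-1 : Int)) s 0).getD b (-2) =
      if b = pvNorm N.toNat s then 0 else (if b < N.toNat then -1 else -2) := by
    intro b
    rw [hd0', pvGetD_set]
    by_cases hb : b = pvNorm N.toNat s
    · rw [if_pos ⟨hb, by simpa using hlt⟩, if_pos hb]
    · rw [if_neg (fun h => hb h.1), if_neg hb]
      by_cases hbl : b < N.toNat
      · rw [if_pos hbl, List.getD_eq_getElem _ _ (by simpa using hbl), List.getElem_replicate]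
      · rw [if_neg hbl, List.getD_eq_default _ _ (by simpa using hbl)]
  have hmain := pvSweepLoop_eq N N.toNat rfl G hGlen hGv hsym N.toNat 0 [s]
    (PySem.List.pySetD (List.replicate N.toNat (-1 : Int)) s 0) (by omega) (by omega) hlen0
    (by intro t ht; simp only [List.mem_singleton] at ht; rw [ht]; exact hvs)
    (by
      intro t ht
      simp only [List.mem_singleton] at ht
      rw [ht, hget0, if_pos rfl, Nat.cast_zero])
    (by
      intro b hb
      rw [Nat.cast_zero, hget0] at hb
      split_ifs at hb with h1 h2
      · exact ⟨s, by simp, h1.symm⟩)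
    (by
      intro x hx
      rw [hd0'] at hx
      rcases List.mem_or_eq_of_mem_set hx with h | h
      · have := List.eq_of_mem_replicate h; omega
      · omega)
    (by
      intro b
      rw [hget0]
      split_ifs <;> omega)
    (by
      have hco := pvCountSet (List.replicate N.toNat (-1 : Int)) (pvNorm N.toNat s) 0
        (by simpa using hlt)
        (by rw [List.getD_eq_getElem _ _ (by simpa using hlt), List.getElem_replicate])
        (by omega)
      have hcr : (List.replicate N.toNat (-1 : Int)).count (-1) = N.toNat := by
        simp
      rw [← hd0'] at hco
      simp only [List.length_singleton]
      omega)
  simpa using hmain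

-- ===== first-argmax characterisation of Python's max(..., key=...) =====

lemma pvMax?_of_split {α : Type} (key : α → Int) (x : α) (suf : List α) :
    ∀ (pre : List α), (∀ y ∈ pre, key y < key x) → (∀ y ∈ suf, key y ≤ key x) →
    PySem.List.max? (pre ++ x :: suf) key = some x := by
  have stay : ∀ (t : List α) (p : α), (∀ y ∈ t, key y ≤ key p) →
      t.foldl (fun acc z => match acc with
        | none => some z
        | some m => if key m < key z then some z else some m) (some p) = some p := by
    intro t
    induction t with
    | nil => intro p _; rfl
    | cons b t ih =>
      intro p hp
      simp only [List.foldl_cons]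
      rw [if_neg (not_lt.2 (hp b (by simp)))]
      exact ih p (fun y hy => hp y (by simp [hy]))
  have pass : ∀ (pre : List α) (p : α), (∀ y ∈ suf, key y ≤ key x) → key p < key x →
      (∀ y ∈ pre, key y < key x) →
      (pre ++ x :: suf).foldl (fun acc z => match acc with
        | none => some z
        | some m => if key m < key z then some z else some m) (some p) = some x := by
    intro pre
    induction pre with
    | nil =>
      intro p hsuf hp _
      simp only [List.nil_append, List.foldl_cons]
      rw [if_pos hp]
      exact stay suf x hsuf
    | cons b pre ih =>
      intro p hsuf hp hpre
      simp only [List.cons_append, List.foldl_cons]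
      by_cases hb : key p < key b
      · rw [if_pos hb]
        exact ih b hsuf (hpre b (by simp)) (fun y hy => hpre y (by simp [hy]))
      · rw [if_neg hb]
        exact ih p hsuf hp (fun y hy => hpre y (by simp [hy]))
  intro pre hpre hsuf
  cases pre with
  | nil =>
    simp only [PySem.List.max?, List.nil_append, List.foldl_cons]
    exact stay suf x hsuf
  | cons a pre' =>
    simp only [PySem.List.max?, List.cons_append, List.foldl_cons]
    exact pass pre' a hsuf (hpre a (by simp)) (fun y hy => hpre y (by simp [hy]))

-- max(range(N), key=lambda x: d[x])  =  d.index(max(d))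
lemma pvArgmax_eq (d : List Int) (N : Int) (hN : 1 ≤ N) (hlen : d.length = N.toNat) :
    ∃ k : Nat, k < d.length ∧
      (PySem.List.max? (PySem.List.pyRange 0 N 1) (fun x => PySem.List.pyGetD d x (-2))).getD 0 = (k : Int) ∧
      pvArgmaxFirst d = (k : Int) := by
  have hd : d ≠ [] := by
    intro hnil
    rw [hnil] at hlen
    simp at hlen
    omega
  cases hM : PySem.List.max? d (fun y => y) with
  | none => exact absurd ((PySem.List.max?_eq_none_iff d _).1 hM) hd
  | some M =>
    have hMmem := PySem.List.max?_mem hM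
    have hMle := PySem.List.max?_id_le hM
    have hsome : (PySem.List.index? d M).isSome := (PySem.List.index?_isSome_iff d M).2 hMmem
    obtain ⟨k, hk⟩ := Option.isSome_iff_exists.1 hsome
    obtain ⟨hklt, hdk, hne⟩ := PySem.List.getElem_of_index?_eq_some hk
    have hkN : (k : Int) < N := by omega
    have hget : ∀ (y : Int) (h0 : 0 ≤ y) (h1 : y < N),
        PySem.List.pyGetD d y (-2) = d[y.toNat]'(by omega) :=
      fun y h0 h1 => PySem.List.pyGetD_eq_getElem d (-2) h0 (by omega)
    refine ⟨k, hklt, ?_, ?_⟩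
    · have hsplit : PySem.List.pyRange 0 N 1 =
          (PySem.List.pyRange 0 (k : Int) 1) ++ (k : Int) :: PySem.List.pyRange ((k : Int) + 1) N 1 := by
        rw [PySem.List.pyRange_one_append 0 (k : Int) N (by omega) (le_of_lt hkN),
          PySem.List.pyRange_one_cons hkN]
      rw [hsplit, pvMax?_of_split]
      · rfl
      · intro y hy
        rw [PySem.List.mem_pyRange_one] at hy
        rw [hget y hy.1 (by omega), hget (k : Int) (by omega) hkN]
        have h1 := hMle _ (List.getElem_mem (show y.toNat < d.length by omega))
        have h2 := hne y.toNat (by omega)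
        have h3 : d[((k : Int)).toNat]'(by omega) = M := by simpa using hdk
        rw [h3]
        omega
      · intro y hy
        rw [PySem.List.mem_pyRange_one] at hy
        rw [hget y (by omega) hy.2, hget (k : Int) (by omega) hkN]
        have h1 := hMle _ (List.getElem_mem (show y.toNat < d.length by omega))
        have h3 : d[((k : Int)).toNat]'(by omega) = M := by simpa using hdk
        rw [h3]
        omega
    · unfold pvArgmaxFirst
      rw [hM]
      have hk' : List.idxOf? M d = some k := by
        rwa [PySem.List.index?_eq_idxOf?] at hk
      simp [hk']

-- the two result loops agree
lemma pvResult_eq (ds dg : List Int) (N : Int)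
    (hs : ds.length = N.toNat) (hg : dg.length = N.toNat) :
    (PySem.List.pyRange 0 N 1).map
      (fun i => 2 * (N - 1) - max (PySem.List.pyGetD ds i (-2)) (PySem.List.pyGetD dg i (-2))) =
    (ds.zip dg).map (fun p => 2 * (N - 1) - (if p.2 < p.1 then p.1 else p.2)) := by
  apply List.ext_getElem
  · simp [PySem.List.length_pyRange_one, hs, hg]
  · intro i h1 h2
    simp only [List.getElem_map, List.getElem_zip]
    rw [PySem.List.getElem_pyRange_one 0 N i (by simpa using h1), zero_add]
    have hi : i < N.toNat := by
      simpa [PySem.List.length_pyRange_one] using h1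
    rw [PySem.List.pyGetD_eq_getElem ds (-2) (by omega) (by rw [hs]; exact_mod_cast by omega),
      PySem.List.pyGetD_eq_getElem dg (-2) (by omega) (by rw [hg]; exact_mod_cast by omega)]
    simp only [Int.toNat_natCast]
    by_cases hc : dg[i]'(by omega) < ds[i]'(by omega)
    · rw [max_eq_left (le_of_lt hc), if_pos hc]
    · rw [max_eq_right (not_lt.1 hc), if_neg hc]

-- ===== VERDICT (by name: the statement is the Claim_ definition above) =====
theorem calculate_shortest_steps_spec : Claim_equal_calculate_shortest_steps := by
  intro N edges _ hpre
  obtain ⟨hN, hedges⟩ := hpre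
  unfold Spec_calculate_shortest_steps calculate_shortest_steps calculate_shortest_steps_alt
  dsimp only
  set G := pvBuildG N edges with hG
  have hInv : pvGInv N.toNat G := pvBuildG_inv N edges hN hedges
  have e0 : pvBfs G N 0 = pvDistances G N 0 := pvBfs_eq_distances N hN G hInv 0 le_rfl (by omega)
  rw [← e0]
  obtain ⟨k₁, hk₁, hA1, hB1⟩ := pvArgmax_eq (pvBfs G N 0) N hN (pvBfs_length G N 0)
  rw [hA1, hB1]
  have hk₁' : (k₁ : Int) < N := by
    have := pvBfs_length G N 0
    omega
  have e1 : pvBfs G N (k₁ : Int) = pvDistances G N (k₁ : Int) :=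
    pvBfs_eq_distances N hN G hInv _ (by positivity) hk₁'
  rw [← e1]
  obtain ⟨k₂, hk₂, hA2, hB2⟩ := pvArgmax_eq (pvBfs G N (k₁ : Int)) N hN (pvBfs_length G N _)
  rw [hA2, hB2]
  have hk₂' : (k₂ : Int) < N := by
    have := pvBfs_length G N (k₁ : Int)
    omega
  have e2 : pvBfs G N (k₂ : Int) = pvDistances G N (k₂ : Int) :=
    pvBfs_eq_distances N hN G hInv _ (by positivity) hk₂'
  rw [← e2]
  exact pvResult_eq _ _ N (pvBfs_length G N _) (pvBfs_length G N _)
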